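-- pv_equiv track=rewrite | github.com/jso122-2/Thinkerbell_prod | Thinkerbell_template_pipeline/individual_file_generator.py | _get_industry_for_brand
-- ===== SOURCE A (Python) =====
-- def _get_industry_for_brand(brand: str) -> str:
--     """Get industry for a given brand"""
--
--     industry_mapping = {
--         "fashion": ["Cotton On", "Country Road", "David Jones", "Myer", "Witchery", "Portmans", "Sportsgirl"],
--         "food": ["Woolworths", "Coles", "Queen Fine Foods", "Boost Juice", "Guzman y Gomez", "Mad Mex"],
--         "tech": ["JB Hi-Fi", "Harvey Norman", "Officeworks", "Telstra", "Commonwealth Bank"],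
--         "home": ["Bunnings", "IKEA", "Freedom", "Adairs", "Bed Bath N' Table"],
--         "beauty": ["Chemist Warehouse", "Priceline", "Sephora", "Mecca", "Lush"],
--         "automotive": ["Supercheap Auto", "Autobarn", "Repco"]
--     }
--
--     for industry, brands in industry_mapping.items():
--         if brand in brands:
--             return industry
--
--     return "other"
-- ===== SOURCE B (Python) =====
-- # Flat brand -> industry table written out once; each call is a single dict lookup.
-- _BRAND_TO_INDUSTRY = {
--     "Cotton On": "fashion",
--     "Country Road": "fashion",
--     "David Jones": "fashion",
--     "Myer": "fashion",
--     "Witchery": "fashion",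
--     "Portmans": "fashion",
--     "Sportsgirl": "fashion",
--     "Woolworths": "food",
--     "Coles": "food",
--     "Queen Fine Foods": "food",
--     "Boost Juice": "food",
--     "Guzman y Gomez": "food",
--     "Mad Mex": "food",
--     "JB Hi-Fi": "tech",
--     "Harvey Norman": "tech",
--     "Officeworks": "tech",
--     "Telstra": "tech",
--     "Commonwealth Bank": "tech",
--     "Bunnings": "home",
--     "IKEA": "home",
--     "Freedom": "home",
--     "Adairs": "home",
--     "Bed Bath N' Table": "home",
--     "Chemist Warehouse": "beauty",
--     "Priceline": "beauty",
--     "Sephora": "beauty",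
--     "Mecca": "beauty",
--     "Lush": "beauty",
--     "Supercheap Auto": "automotive",
--     "Autobarn": "automotive",
--     "Repco": "automotive",
-- }
--
--
-- def _get_industry_for_brand(brand: str) -> str:
--     """Get industry for a given brand"""
--     return _BRAND_TO_INDUSTRY.get(brand, "other")
-- ===== Notes on version B (the rewrite author's own statement) =====
-- stated objective: idiomatic
-- what changed: B stores the data inverted as one flat literal brand-to-industry dict and answers with a single dict .get lookup, instead of A's per-call loop over the industry dict with an inner list-membership scan.
import Mathlib
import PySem

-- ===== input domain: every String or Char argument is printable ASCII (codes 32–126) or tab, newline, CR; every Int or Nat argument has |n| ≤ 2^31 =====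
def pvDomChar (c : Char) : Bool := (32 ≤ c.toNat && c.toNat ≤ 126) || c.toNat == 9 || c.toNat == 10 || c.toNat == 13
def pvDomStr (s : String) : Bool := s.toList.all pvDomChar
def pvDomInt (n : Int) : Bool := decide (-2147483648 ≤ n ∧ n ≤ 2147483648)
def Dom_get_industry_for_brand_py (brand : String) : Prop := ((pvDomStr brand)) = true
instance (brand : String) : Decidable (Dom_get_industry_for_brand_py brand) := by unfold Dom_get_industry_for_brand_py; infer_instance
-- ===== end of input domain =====

-- B stores the data inverted as one flat literal brand→industry dict and answers
-- with a single lookup, instead of A's per-call scan over the industry dict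
-- with an inner list-membership check (objective: idiomatic).

-- ===== PORT A =====
def pvIndustryMappingA : PySem.Dict String (List String) := PySem.Dict.ofList [
  ("fashion", ["Cotton On", "Country Road", "David Jones", "Myer", "Witchery", "Portmans", "Sportsgirl"]),
  ("food", ["Woolworths", "Coles", "Queen Fine Foods", "Boost Juice", "Guzman y Gomez", "Mad Mex"]),
  ("tech", ["JB Hi-Fi", "Harvey Norman", "Officeworks", "Telstra", "Commonwealth Bank"]),
  ("home", ["Bunnings", "IKEA", "Freedom", "Adairs", "Bed Bath N' Table"]),
  ("beauty", ["Chemist Warehouse", "Priceline", "Sephora", "Mecca", "Lush"]),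
  ("automotive", ["Supercheap Auto", "Autobarn", "Repco"])]

-- the 'for industry, brands in …: if brand in brands: return industry' loop
def pvLoopA (brand : String) : List (String × List String) → String
  | [] => "other"
  | (industry, brands) :: rest => if brands.contains brand then industry else pvLoopA brand rest

def get_industry_for_brand_py (brand : String) : String :=
  pvLoopA brand pvIndustryMappingA.items

-- ===== PORT B =====
-- the module-level flat literal _BRAND_TO_INDUSTRY
def pvBrandToIndustry : PySem.Dict String String := PySem.Dict.ofList [
  ("Cotton On", "fashion"),
  ("Country Road", "fashion"),
  ("David Jones", "fashion"),
  ("Myer", "fashion"),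
  ("Witchery", "fashion"),
  ("Portmans", "fashion"),
  ("Sportsgirl", "fashion"),
  ("Woolworths", "food"),
  ("Coles", "food"),
  ("Queen Fine Foods", "food"),
  ("Boost Juice", "food"),
  ("Guzman y Gomez", "food"),
  ("Mad Mex", "food"),
  ("JB Hi-Fi", "tech"),
  ("Harvey Norman", "tech"),
  ("Officeworks", "tech"),
  ("Telstra", "tech"),
  ("Commonwealth Bank", "tech"),
  ("Bunnings", "home"),
  ("IKEA", "home"),
  ("Freedom", "home"),
  ("Adairs", "home"),
  ("Bed Bath N' Table", "home"),
  ("Chemist Warehouse", "beauty"),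
  ("Priceline", "beauty"),
  ("Sephora", "beauty"),
  ("Mecca", "beauty"),
  ("Lush", "beauty"),
  ("Supercheap Auto", "automotive"),
  ("Autobarn", "automotive"),
  ("Repco", "automotive")]

def get_industry_for_brand_py_alt (brand : String) : String :=
  pvBrandToIndustry.getD brand "other"

-- ===== PRECONDITION & SPEC =====
def Spec_get_industry_for_brand_py (brand : String) (out : String) : Prop := out = get_industry_for_brand_py_alt brand
instance (brand : String) (out : String) : Decidable (Spec_get_industry_for_brand_py brand out) := by unfold Spec_get_industry_for_brand_py; infer_instance

-- ===== CLAIM (what is proved, stated in full; the proofs are below) =====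
def Claim_equal_get_industry_for_brand_py : Prop := ∀ (brand : String), Dom_get_industry_for_brand_py brand → Spec_get_industry_for_brand_py brand (get_industry_for_brand_py brand)

-- ===== LEMMAS AND PROOFS =====

-- proof-side helper: first match in a flat association list
def pvFirst (x : String) : List (String × String) → Option String
  | [] => none
  | (k, v) :: rest => if k == x then some v else pvFirst x rest

-- proof-side helper: flatten an industry→brands list into brand→industry pairs
def pvFlatten (l : List (String × List String)) : List (String × String) :=
  l.flatMap (fun p => p.2.map (fun b => (b, p.1)))

theorem pvFirst_map_append (x ind : String) (bs : List String) (r : List (String × String)) :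
    pvFirst x (bs.map (fun b => (b, ind)) ++ r)
      = if bs.contains x then some ind else pvFirst x r := by
  induction bs with
  | nil => simp
  | cons b rest ih =>
    simp only [List.map_cons, List.cons_append, pvFirst, List.contains_cons]
    by_cases hb : x = b
    · subst hb; simp
    · have hb' : (b == x) = false := by simp [Ne.symm hb]
      have hb'' : (x == b) = false := by simp [hb]
      simp [hb', hb'', ih]

theorem pvLoopA_eq_first (brand : String) (l : List (String × List String)) :
    pvLoopA brand l = (pvFirst brand (pvFlatten l)).getD "other" := by
  induction l with
  | nil => rfl
  | cons p rest ih =>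
    obtain ⟨ind, bs⟩ := p
    simp only [pvLoopA, pvFlatten, List.flatMap_cons, pvFirst_map_append]
    split_ifs with h <;> simp [ih, pvFlatten]

theorem pvGet?_mk_eq_first (l : List (String × String)) (x : String) :
    (PySem.Dict.mk l).get? x = pvFirst x l := by
  induction l with
  | nil => rfl
  | cons p rest ih =>
    obtain ⟨k, v⟩ := p
    rw [PySem.Dict.get?_mk_cons]
    simp only [pvFirst, ih]

-- ===== VERDICT (by name: the statement is the Claim_ definition above) =====
theorem get_industry_for_brand_py_spec : Claim_equal_get_industry_for_brand_py := by
  intro brand _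
  unfold Spec_get_industry_for_brand_py get_industry_for_brand_py get_industry_for_brand_py_alt
  have hB : pvBrandToIndustry = PySem.Dict.mk (pvFlatten pvIndustryMappingA.items) := by decide
  rw [PySem.Dict.getD_eq_get?_getD, hB, pvGet?_mk_eq_first, pvLoopA_eq_first]
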